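-- pv_equiv track=rewrite | github.com/BaeJihyun97/CodingTest | 프로그래머스/4/150364. 1，2，3 떨어트리기/1，2，3 떨어트리기.py | check
-- ===== SOURCE A (Python) =====
-- def check(count, target):
--     flag = 1
--     for c, t in zip(count, target):
--         if c > t:
--             return -1
--         elif c * 3 < t:
--             flag = 0
--     return flag
-- ===== SOURCE B (Python) =====
-- def check(count, target):
--     pairs = list(zip(count, target))
--     if any(c > t for c, t in pairs):
--         return -1
--     if any(c * 3 < t for c, t in pairs):
--         return 0
--     return 1
-- ===== Notes on version B (the rewrite author's own statement) =====
-- stated objective: simpler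
-- what changed: Replaced the single mutable-flag loop with early return by two independent any() scans over the zipped pairs; correct because any c > t forces -1 regardless of position.
import Mathlib
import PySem

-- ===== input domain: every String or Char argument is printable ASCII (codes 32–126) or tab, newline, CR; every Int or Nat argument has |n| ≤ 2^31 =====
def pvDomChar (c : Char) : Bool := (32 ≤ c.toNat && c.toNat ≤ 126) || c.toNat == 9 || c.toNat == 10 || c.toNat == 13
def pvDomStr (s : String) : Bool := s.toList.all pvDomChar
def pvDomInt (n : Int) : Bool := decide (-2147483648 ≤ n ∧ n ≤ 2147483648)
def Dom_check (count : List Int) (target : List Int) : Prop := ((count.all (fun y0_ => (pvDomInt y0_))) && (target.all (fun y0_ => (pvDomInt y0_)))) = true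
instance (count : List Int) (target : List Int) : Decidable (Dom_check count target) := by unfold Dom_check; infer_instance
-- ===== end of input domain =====

-- B replaces A's single mutable-flag loop with early return by two independent any() scans (simpler decomposition).

-- ===== PORT A =====
-- the for-loop over zip(count, target) with mutable flag and early return -1
def checkLoop : List (Int × Int) → Int → Int
  | [], flag => flag
  | (c, t) :: rest, flag =>
      if c > t then -1
      else if c * 3 < t then checkLoop rest 0
      else checkLoop rest flag

def check (count : List Int) (target : List Int) : Int :=
  checkLoop (count.zip target) 1

-- ===== PORT B =====
def check_alt (count : List Int) (target : List Int) : Int :=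
  let pairs := count.zip target
  if pairs.any (fun p => p.1 > p.2) then -1
  else if pairs.any (fun p => p.1 * 3 < p.2) then 0
  else 1

-- ===== PRECONDITION & SPEC =====
def Spec_check (count : List Int) (target : List Int) (out : Int) : Prop := out = check_alt count target
instance (count : List Int) (target : List Int) (out : Int) : Decidable (Spec_check count target out) := by unfold Spec_check; infer_instance

-- ===== CLAIM (what is proved, stated in full; the proofs are below) =====
def Claim_equal_check : Prop := ∀ (count : List Int) (target : List Int), Dom_check count target → Spec_check count target (check count target)

-- ===== LEMMAS AND PROOFS =====
theorem checkLoop_eq (l : List (Int × Int)) (flag : Int) :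
    checkLoop l flag =
      if l.any (fun p => p.1 > p.2) then -1
      else if l.any (fun p => p.1 * 3 < p.2) then 0
      else flag := by
  induction l generalizing flag with
  | nil => simp [checkLoop]
  | cons hd tl ih =>
    obtain ⟨c, t⟩ := hd
    simp only [checkLoop, List.any_cons, ih]
    by_cases h1 : c > t
    · simp [h1]
    · by_cases h2 : c * 3 < t
      · simp only [if_neg h1, if_pos h2, decide_eq_false h1, decide_eq_true h2,
          Bool.false_or, Bool.true_or]
        split <;> simp
      · simp only [if_neg h1, if_neg h2, decide_eq_false h1, decide_eq_false h2,
          Bool.false_or]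

-- ===== VERDICT (by name: the statement is the Claim_ definition above) =====
theorem check_spec : Claim_equal_check := by
  intro count target _
  unfold Spec_check check check_alt
  simp [checkLoop_eq]
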